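-- pv_equiv track=rewrite | github.com/johnnyflame/EPI-study-notes | string_problems.py | is_palindrome_sentence
-- ===== SOURCE A (Python) =====
-- def is_palindrome_sentence(s):
--     """
--     6.5
--
--     A classic case of two pointer (start and end) manipulation
--     :param s:
--     :return:
--     """
--     i, j = 0, len(s)-1
--
--     while i < j:
--         while not s[i].isalnum() and i < j:
--             i +=1
--         while not s[j].isalnum() and i < j:
--             j -= 1
--
--         if s[i].lower() != s[j].lower():
--             return False
--
--         i+=1
--         j-=1
--
--     return True
-- ===== SOURCE B (Python) =====
-- def is_palindrome_sentence(s):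
--     cleaned = [c.lower() for c in s if c.isalnum()]
--     return cleaned == cleaned[::-1]
-- ===== Notes on version B (the rewrite author's own statement) =====
-- stated objective: idiomatic
-- what changed: Replaces A's interleaved two-pointer skip/compare loop with a single filter-and-lowercase pass followed by comparing the cleaned list to its reverse.
import Mathlib
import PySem

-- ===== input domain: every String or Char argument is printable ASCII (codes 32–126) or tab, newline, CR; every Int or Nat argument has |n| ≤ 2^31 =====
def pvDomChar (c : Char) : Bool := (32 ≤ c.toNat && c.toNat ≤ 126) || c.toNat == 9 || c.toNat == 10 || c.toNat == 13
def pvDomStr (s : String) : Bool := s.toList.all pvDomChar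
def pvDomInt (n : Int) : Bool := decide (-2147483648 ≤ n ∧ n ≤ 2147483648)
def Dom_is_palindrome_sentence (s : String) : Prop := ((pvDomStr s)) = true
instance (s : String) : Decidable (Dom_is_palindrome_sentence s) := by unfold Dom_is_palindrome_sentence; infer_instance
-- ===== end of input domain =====

-- B replaces A's interleaved two-pointer skip/compare loop by one filter-and-lowercase pass followed by
-- comparing the cleaned list with its reverse (idiomatic; same asymptotic cost). Neither mutates its argument.

-- ===== PORT A =====
-- Every index A reads is in range on every reachable state (0 ≤ i ≤ j < len whenever s[i]/s[j] is read),
-- so s[i] is ported as pyGetD with an irrelevant default.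
def pvChAt (cs : List Char) (i : Int) : Char := PySem.List.pyGetD cs i ' '

-- inner `while not s[i].isalnum() and i < j: i += 1`
def pvSkipI (cs : List Char) (i j : Int) : Int :=
  if _h : ¬ PySem.Chars.isalnum (pvChAt cs i) ∧ i < j then pvSkipI cs (i+1) j else i
termination_by (j - i).toNat
decreasing_by omega

-- inner `while not s[j].isalnum() and i < j: j -= 1`
def pvSkipJ (cs : List Char) (i j : Int) : Int :=
  if _h : ¬ PySem.Chars.isalnum (pvChAt cs j) ∧ i < j then pvSkipJ cs i (j-1) else j
termination_by (j - i).toNat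
decreasing_by omega

-- bounds of the skip loops; the outer loop's termination argument cites them
theorem pvSkipI_ge (cs : List Char) (i j : Int) : i ≤ pvSkipI cs i j := by
  rw [pvSkipI]
  split
  · have := pvSkipI_ge cs (i+1) j; omega
  · omega
termination_by (j - i).toNat
decreasing_by omega


theorem pvSkipJ_le (cs : List Char) (i j : Int) : pvSkipJ cs i j ≤ j := by
  rw [pvSkipJ]
  split
  · have := pvSkipJ_le cs i (j-1); omega
  · omega
termination_by (j - i).toNat
decreasing_by omega


-- outer `while i < j`
def pvLoopA (cs : List Char) (i j : Int) : Bool :=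
  if _h : i < j then
    if PySem.Chars.lowerChar (pvChAt cs (pvSkipI cs i j)) ≠
       PySem.Chars.lowerChar (pvChAt cs (pvSkipJ cs (pvSkipI cs i j) j)) then false
    else pvLoopA cs (pvSkipI cs i j + 1) (pvSkipJ cs (pvSkipI cs i j) j - 1)
  else true
termination_by (j - i).toNat
decreasing_by
  have h1 := pvSkipI_ge cs i j
  have h2 := pvSkipJ_le cs (pvSkipI cs i j) j
  omega

def is_palindrome_sentence (s : String) : Bool :=
  pvLoopA s.toList 0 ((s.toList.length : Int) - 1)

-- ===== PORT B =====
def is_palindrome_sentence_alt (s : String) : Bool :=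
  let cleaned := (s.toList.filter PySem.Chars.isalnum).map PySem.Chars.lowerChar
  cleaned == cleaned.reverse

-- ===== PRECONDITION & SPEC =====
def Spec_is_palindrome_sentence (s : String) (out : Bool) : Prop := out = is_palindrome_sentence_alt s
instance (s : String) (out : Bool) : Decidable (Spec_is_palindrome_sentence s out) := by unfold Spec_is_palindrome_sentence; infer_instance

-- ===== CLAIM (what is proved, stated in full; the proofs are below) =====
def Claim_equal_is_palindrome_sentence : Prop := ∀ (s : String), Dom_is_palindrome_sentence s → Spec_is_palindrome_sentence s (is_palindrome_sentence s)

-- ===== LEMMAS AND PROOFS =====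

theorem pvSkipI_le (cs : List Char) (i j : Int) (h : i ≤ j) : pvSkipI cs i j ≤ j := by
  rw [pvSkipI]
  split
  · next hc => exact pvSkipI_le cs (i+1) j (by omega)
  · omega
termination_by (j - i).toNat
decreasing_by omega

theorem pvSkipJ_ge (cs : List Char) (i j : Int) (h : i ≤ j) : i ≤ pvSkipJ cs i j := by
  rw [pvSkipJ]
  split
  · next hc => exact pvSkipJ_ge cs i (j-1) (by omega)
  · omega
termination_by (j - i).toNat
decreasing_by omega

-- the cleaned (filtered + lowered) contents of the list
def pvClean (l : List Char) : List Char := (l.filter PySem.Chars.isalnum).map PySem.Chars.lowerChar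

-- the slice cs[i..j] (both ends inclusive) A's pointers still have to examine
def pvSeg (cs : List Char) (i j : Int) : List Char := (cs.drop i.toNat).take (j + 1 - i).toNat

theorem pvChAt_eq (cs : List Char) (i : Int) (h0 : 0 ≤ i) (h1 : i < cs.length) :
    pvChAt cs i = cs[i.toNat]'(by omega) := by
  simpa [pvChAt] using PySem.List.pyGetD_eq_getElem cs ' ' h0 h1

theorem pvClean_cons (c : Char) (l : List Char) :
    pvClean (c :: l) = if PySem.Chars.isalnum c then PySem.Chars.lowerChar c :: pvClean l else pvClean l := by
  by_cases h : PySem.Chars.isalnum c <;> simp [pvClean, List.filter, h]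

theorem pvClean_append (l m : List Char) : pvClean (l ++ m) = pvClean l ++ pvClean m := by
  simp [pvClean]

theorem pvSeg_empty (cs : List Char) (i j : Int) (h : j < i) : pvSeg cs i j = [] := by
  have h1 : (j + 1 - i).toNat = 0 := by omega
  rw [pvSeg, h1, List.take_zero]

theorem pvSeg_cons (cs : List Char) (i j : Int) (h0 : 0 ≤ i) (hij : i ≤ j) (hj : j < cs.length) :
    pvSeg cs i j = cs[i.toNat]'(by omega) :: pvSeg cs (i+1) j := by
  have hlt : i.toNat < cs.length := by omega
  have hd : cs.drop i.toNat = cs[i.toNat] :: cs.drop (i.toNat + 1) := List.drop_eq_getElem_cons hlt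
  have h1 : (j + 1 - i).toNat = (j - i).toNat + 1 := by omega
  have h2 : (i + 1).toNat = i.toNat + 1 := by omega
  have h3 : (j + 1 - (i + 1)).toNat = (j - i).toNat := by omega
  rw [pvSeg, pvSeg, hd, h1, h2, h3, List.take_succ_cons]

theorem pvSeg_snoc (cs : List Char) (i j : Int) (h0 : 0 ≤ i) (hij : i ≤ j) (hj : j < cs.length) :
    pvSeg cs i j = pvSeg cs i (j-1) ++ [cs[j.toNat]'(by omega)] := by
  have h1 : (j + 1 - i).toNat = (j - i).toNat + 1 := by omega
  have h2 : (j - 1 + 1 - i).toNat = (j - i).toNat := by omega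
  have h3 : (cs.drop i.toNat)[(j - i).toNat]? = some (cs[j.toNat]'(by omega)) := by
    rw [List.getElem?_drop]
    have : i.toNat + (j - i).toNat = j.toNat := by omega
    rw [this]
    exact List.getElem?_eq_getElem (by omega)
  rw [pvSeg, pvSeg, h1, h2, List.take_add_one, h3]
  rfl

theorem pvSkipI_clean (cs : List Char) (i j : Int) (h0 : 0 ≤ i) (hij : i ≤ j) (hj : j < cs.length) :
    pvClean (pvSeg cs i j) = pvClean (pvSeg cs (pvSkipI cs i j) j) := by
  rw [pvSkipI]
  split
  · next hc =>
    rw [pvSeg_cons cs i j h0 hij hj, pvClean_cons]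
    rw [pvChAt_eq cs i h0 (by omega)] at hc
    simp only [hc.1, if_neg, Bool.false_eq_true, not_false_eq_true]
    exact pvSkipI_clean cs (i+1) j (by omega) (by omega) hj
  · rfl
termination_by (j - i).toNat
decreasing_by omega

theorem pvSkipJ_clean (cs : List Char) (i j : Int) (h0 : 0 ≤ i) (hij : i ≤ j) (hj : j < cs.length) :
    pvClean (pvSeg cs i j) = pvClean (pvSeg cs i (pvSkipJ cs i j)) := by
  rw [pvSkipJ]
  split
  · next hc =>
    rw [pvSeg_snoc cs i j h0 hij hj, pvClean_append]
    rw [pvChAt_eq cs j (by omega) hj] at hc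
    have : pvClean [cs[j.toNat]'(by omega)] = [] := by
      simp [pvClean, hc.1]
    rw [this, List.append_nil]
    exact pvSkipJ_clean cs i (j-1) h0 (by omega) (by omega)
  · rfl
termination_by (j - i).toNat
decreasing_by omega

theorem pvSkipI_stop (cs : List Char) (i j : Int) (h : pvSkipI cs i j < j) :
    PySem.Chars.isalnum (pvChAt cs (pvSkipI cs i j)) = true := by
  rw [pvSkipI] at h ⊢
  split at h
  · next hc => rw [dif_pos hc]; exact pvSkipI_stop cs (i+1) j h
  · next hc => rw [dif_neg hc]; by_contra hno; exact hc ⟨by simpa using hno, h⟩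
termination_by (j - i).toNat
decreasing_by omega

theorem pvSkipJ_stop (cs : List Char) (i j : Int) (h : i < pvSkipJ cs i j) :
    PySem.Chars.isalnum (pvChAt cs (pvSkipJ cs i j)) = true := by
  rw [pvSkipJ] at h ⊢
  split at h
  · next hc => rw [dif_pos hc]; exact pvSkipJ_stop cs i (j-1) h
  · next hc => rw [dif_neg hc]; by_contra hno; exact hc ⟨by simpa using hno, h⟩
termination_by (j - i).toNat
decreasing_by omega

theorem pvPalWrap (a b : Char) (m : List Char) :
    (a :: m ++ [b] = (a :: m ++ [b]).reverse) ↔ (a = b ∧ m = m.reverse) := by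
  have hrev : (a :: m ++ [b]).reverse = b :: m.reverse ++ [a] := by simp
  rw [hrev]
  simp only [List.cons_append]
  rw [List.cons_eq_cons]
  constructor
  · rintro ⟨rfl, hm⟩
    exact ⟨rfl, List.append_cancel_right hm⟩
  · rintro ⟨rfl, hm⟩
    exact ⟨rfl, by rw [← hm]⟩

-- single characters and the empty segment are palindromes after cleaning
theorem pvClean_short (l : List Char) (h : l.length ≤ 1) : pvClean l = (pvClean l).reverse := by
  match l, h with
  | [], _ => simp [pvClean]
  | [c], _ => by_cases hc : PySem.Chars.isalnum c <;> simp [pvClean, hc]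

-- main invariant: A's loop decides whether the cleaned slice cs[i..j] is a palindrome
theorem pvLoopA_eq (cs : List Char) : ∀ (n : Nat) (i j : Int), 0 ≤ i → j < cs.length →
    (j - i).toNat ≤ n →
    pvLoopA cs i j = decide (pvClean (pvSeg cs i j) = (pvClean (pvSeg cs i j)).reverse) := by
  intro n
  induction n with
  | zero =>
    intro i j h0 hj hn
    have hij : j ≤ i := by omega
    rw [pvLoopA, dif_neg (by omega)]
    by_cases h : j < i
    · rw [pvSeg_empty cs i j h]; simp [pvClean]
    · have hii : i = j := by omega
      subst hii
      rw [pvSeg_cons cs i i h0 le_rfl hj, pvSeg_empty cs (i+1) i (by omega)]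
      exact (decide_eq_true (pvClean_short _ (by simp))).symm
  | succ n ih =>
    intro i j h0 hj hn
    by_cases h : i < j
    · have hi1 := pvSkipI_ge cs i j
      have hi2 := pvSkipI_le cs i j (by omega)
      set i' := pvSkipI cs i j with hi'
      have hj1 := pvSkipJ_le cs i' j
      have hj2 := pvSkipJ_ge cs i' j (by omega)
      set j' := pvSkipJ cs i' j with hj'
      have hcl : pvClean (pvSeg cs i j) = pvClean (pvSeg cs i' j') := by
        rw [pvSkipI_clean cs i j h0 (by omega) hj, ← hi',
            pvSkipJ_clean cs i' j (by omega) (by omega) hj, ← hj']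
      rw [pvLoopA, dif_pos h, ← hi', ← hj', hcl]
      by_cases hij' : i' < j'
      · have ha1 : PySem.Chars.isalnum (pvChAt cs i') = true := pvSkipI_stop cs i j (by omega)
        have ha2 : PySem.Chars.isalnum (pvChAt cs j') = true := pvSkipJ_stop cs i' j (by omega)
        have hgi : pvChAt cs i' = cs[i'.toNat]'(by omega) := pvChAt_eq cs i' (by omega) (by omega)
        have hgj : pvChAt cs j' = cs[j'.toNat]'(by omega) := pvChAt_eq cs j' (by omega) (by omega)
        have hdecomp : pvClean (pvSeg cs i' j') =
            PySem.Chars.lowerChar (pvChAt cs i') ::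
              pvClean (pvSeg cs (i'+1) (j'-1)) ++ [PySem.Chars.lowerChar (pvChAt cs j')] := by
          rw [pvSeg_cons cs i' j' (by omega) (by omega) (by omega),
              pvSeg_snoc cs (i'+1) j' (by omega) (by omega) (by omega),
              pvClean_cons, pvClean_append, hgi, hgj]
          rw [hgi] at ha1; rw [hgj] at ha2
          simp [ha1, pvClean, ha2]
        have hiff : (pvClean (pvSeg cs i' j') = (pvClean (pvSeg cs i' j')).reverse) ↔
            (PySem.Chars.lowerChar (pvChAt cs i') = PySem.Chars.lowerChar (pvChAt cs j') ∧
             pvClean (pvSeg cs (i'+1) (j'-1)) = (pvClean (pvSeg cs (i'+1) (j'-1))).reverse) := by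
          rw [hdecomp]
          exact pvPalWrap _ _ _
        by_cases hne : PySem.Chars.lowerChar (pvChAt cs i') = PySem.Chars.lowerChar (pvChAt cs j')
        · rw [if_neg (by simpa using hne)]
          rw [ih (i'+1) (j'-1) (by omega) (by omega) (by omega)]
          have h2 : (pvClean (pvSeg cs i' j') = (pvClean (pvSeg cs i' j')).reverse) ↔
              (pvClean (pvSeg cs (i'+1) (j'-1)) = (pvClean (pvSeg cs (i'+1) (j'-1))).reverse) :=
            hiff.trans (and_iff_right hne)
          exact (decide_eq_decide.mpr h2).symm
        · rw [if_pos (by simpa using hne)]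
          exact (decide_eq_false (fun hp => hne (hiff.mp hp).1)).symm
      · have heq : i' = j' := by omega
        rw [if_neg (by rw [heq]; simp)]
        rw [pvLoopA, dif_neg (by omega)]
        have hsing : pvSeg cs i' j' = [cs[i'.toNat]'(by omega)] := by
          rw [pvSeg_cons cs i' j' (by omega) (by omega) (by omega),
              pvSeg_empty cs (i'+1) j' (by omega)]
        rw [hsing]
        exact (decide_eq_true (pvClean_short _ (by simp))).symm
    · rw [pvLoopA, dif_neg h]
      by_cases hlt : j < i
      · rw [pvSeg_empty cs i j hlt]; simp [pvClean]
      · have hii : i = j := by omega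
        subst hii
        rw [pvSeg_cons cs i i h0 le_rfl hj, pvSeg_empty cs (i+1) i (by omega)]
        exact (decide_eq_true (pvClean_short _ (by simp))).symm

-- ===== VERDICT (by name: the statement is the Claim_ definition above) =====
theorem is_palindrome_sentence_spec : Claim_equal_is_palindrome_sentence := by
  intro s _
  unfold Spec_is_palindrome_sentence is_palindrome_sentence is_palindrome_sentence_alt
  set cs := s.toList with hcs
  have hfull : pvSeg cs 0 ((cs.length : Int) - 1) = cs := by
    have hl : ((cs.length : Int) - 1 + 1 - 0).toNat = cs.length := by omega
    rw [pvSeg, hl, Int.toNat_zero, List.drop_zero, List.take_length]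
  rw [pvLoopA_eq cs ((cs.length : Int) - 1).toNat 0 ((cs.length : Int) - 1) le_rfl (by omega) (by omega),
      hfull]
  exact (Bool.beq_eq_decide_eq _ _).symm
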